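-- pv_equiv track=rewrite | github.com/zyjohn-design/deepagents | libs/deepagents/deepagents/middleware/skills.py | _validate_skill_name
-- ===== SOURCE A (Python) =====
-- MAX_SKILL_NAME_LENGTH = 64
--
-- def _validate_skill_name(name: str, directory_name: str) -> tuple[bool, str]:
--     """Validate skill name per Agent Skills specification.
--
--     Constraints per Agent Skills specification:
--
--     - 1-64 characters
--     - Unicode lowercase alphanumeric and hyphens only (`a-z` and `-`).
--     - Must not start or end with `-`
--     - Must not contain consecutive `--`
--     - Must match the parent directory name containing the `SKILL.md` file
--
--     Unicode lowercase alphanumeric means any character where `c.isalpha() and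
--     c.islower()` or `c.isdigit()` returns `True`, which covers accented Latin
--     characters (e.g., `'café'`, `'über-tool'`) and other scripts.
--
--     Args:
--         name: Skill name from YAML frontmatter
--         directory_name: Parent directory name
--
--     Returns:
--         `(is_valid, error_message)` tuple.
--
--             Error message is empty if valid.
--     """
--     if not name:
--         return False, "name is required"
--     if len(name) > MAX_SKILL_NAME_LENGTH:
--         return False, "name exceeds 64 characters"
--     if name.startswith("-") or name.endswith("-") or "--" in name:
--         return False, "name must be lowercase alphanumeric with single hyphens only"
--     for c in name:
--         if c == "-":
--             continue
--         if (c.isalpha() and c.islower()) or c.isdigit():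
--             continue
--         return False, "name must be lowercase alphanumeric with single hyphens only"
--     if name != directory_name:
--         return False, f"name '{name}' must match directory name '{directory_name}'"
--     return True, ""
-- ===== SOURCE B (Python) =====
-- MAX_SKILL_NAME_LENGTH = 64
--
-- _FORMAT_MSG = "name must be lowercase alphanumeric with single hyphens only"
--
--
-- def _segment_ok(p):
--     """A hyphen-free segment is valid iff non-empty and every character is
--     lowercase alphabetic or a digit."""
--     return p != "" and all((c.isalpha() and c.islower()) or c.isdigit() for c in p)
--
--
-- def _validate_skill_name(name: str, directory_name: str) -> tuple[bool, str]:
--     if not name: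
--         return False, "name is required"
--     if len(name) > MAX_SKILL_NAME_LENGTH:
--         return False, "name exceeds 64 characters"
--     # leading/trailing '-' or '--' show up as empty segments of the split
--     if not all(_segment_ok(p) for p in name.split("-")):
--         return False, _FORMAT_MSG
--     if name != directory_name:
--         return False, f"name '{name}' must match directory name '{directory_name}'"
--     return True, ""
-- ===== Notes on version B (the rewrite author's own statement) =====
-- stated objective: alternative
-- what changed: A's three structural substring checks (startswith '-', endswith '-', '--' search) plus a separate per-character loop are replaced by splitting the name on '-' and validating each hyphen-free segment (non-empty, all lowercase-alphanumeric) in one pass over the segments.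
import Mathlib
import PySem

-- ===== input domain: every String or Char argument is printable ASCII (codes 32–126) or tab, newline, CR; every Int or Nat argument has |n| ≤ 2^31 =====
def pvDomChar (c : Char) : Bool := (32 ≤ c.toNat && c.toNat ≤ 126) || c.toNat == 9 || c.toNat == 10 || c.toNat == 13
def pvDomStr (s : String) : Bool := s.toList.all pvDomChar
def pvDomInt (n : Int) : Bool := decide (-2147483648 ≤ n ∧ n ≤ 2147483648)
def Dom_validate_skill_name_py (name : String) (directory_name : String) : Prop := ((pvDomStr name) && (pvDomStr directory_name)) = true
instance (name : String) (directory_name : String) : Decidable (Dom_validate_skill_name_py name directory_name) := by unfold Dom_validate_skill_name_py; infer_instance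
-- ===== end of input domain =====

-- B replaces A's three structural substring checks (startswith/endswith/"--" in) and
-- second character loop by splitting the name on '-' and validating each hyphen-free
-- segment (non-empty, all lowercase-alphanumeric) — objective: alternative, same cost.

-- ===== PORT A =====
-- the character loop of A: returns the error pair at the first disallowed character, none if the loop falls through
def pvLoopA : List Char → Option (Bool × String)
  | [] => none
  | c :: rest =>
    if c == '-' then pvLoopA rest
    else if (PySem.Chars.isalpha c && PySem.Chars.islower c) || PySem.Chars.isdigit c then pvLoopA rest
    else some (false, "name must be lowercase alphanumeric with single hyphens only")

def validate_skill_name_py (name : String) (directory_name : String) : Bool × String :=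
  if PySem.Str.len name = 0 then (false, "name is required")
  else if PySem.Str.len name > 64 then (false, "name exceeds 64 characters")
  else if PySem.Str.startswith name "-" || PySem.Str.endswith name "-" || PySem.Str.isIn "--" name then
    (false, "name must be lowercase alphanumeric with single hyphens only")
  else match pvLoopA name.toList with
    | some r => r
    | none =>
      if name ≠ directory_name then
        (false, PySem.Str.join "" ["name '", name, "' must match directory name '", directory_name, "'"])
      else (true, "")

-- ===== PORT B =====
-- _segment_ok: a hyphen-free segment is valid iff non-empty and all lowercase-alphanumeric
def pvSegmentOk (p : List Char) : Bool :=
  !(p == []) && p.all (fun c => (PySem.Chars.isalpha c && PySem.Chars.islower c) || PySem.Chars.isdigit c)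

def validate_skill_name_py_alt (name : String) (directory_name : String) : Bool × String :=
  if PySem.Str.len name = 0 then (false, "name is required")
  else if PySem.Str.len name > 64 then (false, "name exceeds 64 characters")
  else if !((PySem.Chars.splitOn name.toList ['-']).all pvSegmentOk) then
    (false, "name must be lowercase alphanumeric with single hyphens only")
  else if name ≠ directory_name then
    (false, PySem.Str.join "" ["name '", name, "' must match directory name '", directory_name, "'"])
  else (true, "")

-- ===== PRECONDITION & SPEC =====
def Spec_validate_skill_name_py (name : String) (directory_name : String) (out : Bool × String) : Prop := out = validate_skill_name_py_alt name directory_name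
instance (name : String) (directory_name : String) (out : Bool × String) : Decidable (Spec_validate_skill_name_py name directory_name out) := by unfold Spec_validate_skill_name_py; infer_instance

-- ===== CLAIM (what is proved, stated in full; the proofs are below) =====
def Claim_equal_validate_skill_name_py : Prop := ∀ (name : String) (directory_name : String), Dom_validate_skill_name_py name directory_name → Spec_validate_skill_name_py name directory_name (validate_skill_name_py name directory_name)

-- ===== LEMMAS AND PROOFS =====

-- the character test both sides use, for stating the invariants
def pvAllowed (c : Char) : Bool := (PySem.Chars.isalpha c && PySem.Chars.islower c) || PySem.Chars.isdigit c

-- fuel-free model of PySem.Chars.splitOn on the single-character separator '-'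
def pvSplitHy (cur : List Char) : List Char → List (List Char)
  | [] => [cur.reverse]
  | c :: rest => if c = '-' then cur.reverse :: pvSplitHy [] rest else pvSplitHy (c :: cur) rest

lemma pvGo_eq (fuel : Nat) : ∀ (l cur : List Char) (acc : List (List Char)), l.length < fuel →
    PySem.Chars.splitOn.go ['-'] fuel l cur acc = acc.reverse ++ pvSplitHy cur l := by
  induction fuel with
  | zero => intro l cur acc h; omega
  | succ n ih =>
    intro l cur acc h
    cases l with
    | nil => simp [PySem.Chars.splitOn.go, pvSplitHy]
    | cons c rest =>
      by_cases hc : c = '-'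
      · subst hc
        rw [show PySem.Chars.splitOn.go ['-'] (n+1) ('-' :: rest) cur acc
              = PySem.Chars.splitOn.go ['-'] n (List.drop 1 ('-' :: rest)) [] (cur.reverse :: acc) by
            simp [PySem.Chars.splitOn.go, List.isPrefixOf]]
        rw [List.drop_one, List.tail_cons, ih rest [] _ (by simpa using h)]
        simp [pvSplitHy]
      · have hp : (['-'] : List Char).isPrefixOf (c :: rest) = false := by
          simp only [List.isPrefixOf, Bool.and_true, beq_eq_false_iff_ne, ne_eq]
          exact fun h => hc h.symm
        rw [show PySem.Chars.splitOn.go ['-'] (n+1) (c :: rest) cur acc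
              = PySem.Chars.splitOn.go ['-'] n rest (c :: cur) acc by
            simp [PySem.Chars.splitOn.go, hp]]
        rw [ih rest (c :: cur) acc (by simpa using h)]
        simp [pvSplitHy, hc]

lemma pvSplitOn_eq (cs : List Char) : PySem.Chars.splitOn cs ['-'] = pvSplitHy [] cs := by
  rw [PySem.Chars.splitOn, pvGo_eq (cs.length + 1) cs [] [] (by omega)]
  simp

-- the scanning predicate the proof relates both sides to: prev is the previous character
def pvScan (prev : Char) : List Char → Bool
  | [] => !(prev == '-')
  | c :: rest =>
    if c = '-' then
      if prev = '-' then false else pvScan c rest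
    else if pvAllowed c then pvScan c rest
    else false

lemma pvScan_congr (p q : Char) (hpq : (p = '-') ↔ (q = '-')) (cs : List Char) :
    pvScan p cs = pvScan q cs := by
  cases cs with
  | nil =>
    simp only [pvScan]
    by_cases hp : p = '-'
    · simp [hp, hpq.mp hp]
    · have hq : ¬ q = '-' := fun h => hp (hpq.mpr h)
      simp [hp, hq]
  | cons c rest =>
    simp only [pvScan]
    by_cases hc : c = '-'
    · by_cases hp : p = '-'
      · simp [hc, hp, hpq.mp hp]
      · have hq : ¬ q = '-' := fun h => hp (hpq.mpr h)
        simp [hc, hp, hq]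
    · simp [hc]

-- B's split-and-check equals the scan, for any partially read segment cur
lemma pvAll_splitHy (cs : List Char) : ∀ cur : List Char,
    ((pvSplitHy cur cs).all pvSegmentOk) = (cur.all pvAllowed && pvScan (if cur.isEmpty then '-' else 'a') cs) := by
  have hfun : (fun c => PySem.Chars.isalpha c && PySem.Chars.islower c || PySem.Chars.isdigit c) = pvAllowed := rfl
  have hne : ¬ ('a' : Char) = '-' := by decide
  induction cs with
  | nil =>
    intro cur
    cases cur with
    | nil => simp [pvSplitHy, pvSegmentOk, pvScan]
    | cons x t =>
      have hE : ((x :: t).reverse == ([] : List Char)) = false := by simp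
      have hE2 : (t.reverse ++ [x]).isEmpty = false := by simp
      simp [pvSplitHy, pvSegmentOk, pvScan, hfun, hE, hE2, hne,
        Bool.and_comm, Bool.and_left_comm, Bool.and_assoc]
  | cons c rest ih =>
    intro cur
    by_cases hc : c = '-'
    · subst hc
      rw [show pvSplitHy cur ('-' :: rest) = cur.reverse :: pvSplitHy [] rest by simp [pvSplitHy]]
      rw [List.all_cons, ih []]
      cases cur with
      | nil => simp [pvSegmentOk, pvScan]
      | cons x t =>
        have hE : ((x :: t).reverse == ([] : List Char)) = false := by simp
        have hE2 : (t.reverse ++ [x]).isEmpty = false := by simp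
        simp [pvSegmentOk, pvScan, hfun, hE, hE2, hne,
          Bool.and_comm, Bool.and_left_comm, Bool.and_assoc]
    · rw [show pvSplitHy cur (c :: rest) = pvSplitHy (c :: cur) rest by simp [pvSplitHy, hc]]
      rw [ih (c :: cur)]
      by_cases ha : pvAllowed c = true
      · have hsc : pvScan c rest = pvScan 'a' rest :=
          pvScan_congr c 'a' (by constructor <;> intro h <;> first | exact absurd h hc | exact absurd h (by decide)) rest
        cases cur with
        | nil =>
          simp [pvScan, hc, ha, hsc, Bool.and_comm, Bool.and_left_comm, Bool.and_assoc]
        | cons x t =>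
          simp [pvScan, hc, ha, hsc, Bool.and_comm, Bool.and_left_comm, Bool.and_assoc]
      · have ha' : pvAllowed c = false := by simpa using ha
        simp [pvScan, hc, ha']

lemma pvLoopA_eq_none_iff (cs : List Char) :
    pvLoopA cs = none ↔ ∀ c ∈ cs, c = '-' ∨ pvAllowed c = true := by
  induction cs with
  | nil => simp [pvLoopA]
  | cons c rest ih =>
    by_cases h1 : c = '-'
    · subst h1
      simp [pvLoopA, ih]
    · by_cases h2 : pvAllowed c = true
      · rw [show pvLoopA (c :: rest) = pvLoopA rest by
            simp [pvLoopA, h1, show ((PySem.Chars.isalpha c && PySem.Chars.islower c) || PySem.Chars.isdigit c) = true from h2]]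
        rw [ih]
        constructor
        · intro hall x hx
          rcases List.mem_cons.mp hx with rfl | hx
          · exact Or.inr h2
          · exact hall x hx
        · exact fun hall x hx => hall x (List.mem_cons_of_mem _ hx)
      · rw [show pvLoopA (c :: rest) = some (false, "name must be lowercase alphanumeric with single hyphens only") by
            simp [pvLoopA, h1, show ¬ ((PySem.Chars.isalpha c && PySem.Chars.islower c) || PySem.Chars.isdigit c) = true by simpa [pvAllowed] using h2]]
        simp only [reduceCtorEq, false_iff, not_forall]
        exact ⟨c, ⟨List.mem_cons_self, by rintro (h | h); exacts [h1 h, h2 h]⟩⟩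

lemma pvLoopA_cases (cs : List Char) :
    pvLoopA cs = none ∨ pvLoopA cs = some (false, "name must be lowercase alphanumeric with single hyphens only") := by
  induction cs with
  | nil => simp [pvLoopA]
  | cons c rest ih =>
    simp only [pvLoopA]
    split_ifs <;> simp [ih]

lemma pvScan_iff (cs : List Char) : ∀ (prev : Char),
    pvScan prev cs = true ↔
      ¬ (['-', '-'] <:+: (prev :: cs)) ∧ (prev :: cs).getLast? ≠ some '-' ∧
      ∀ c ∈ cs, c = '-' ∨ pvAllowed c = true := by
  induction cs with
  | nil =>
    intro prev
    simp only [pvScan, List.getLast?_singleton]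
    constructor
    · intro h
      refine ⟨?_, by simpa using h, by simp⟩
      intro hinf
      have := hinf.length_le
      simp at this
    · intro ⟨_, h, _⟩
      simpa using h
  | cons c rest ih =>
    intro prev
    have hinf : (['-', '-'] <:+: (prev :: c :: rest)) ↔ (prev = '-' ∧ c = '-') ∨ ['-', '-'] <:+: (c :: rest) := by
      rw [List.infix_cons_iff]
      constructor
      · rintro (hp | h)
        · obtain ⟨e1, hp⟩ := List.cons_prefix_cons.mp hp
          obtain ⟨e2, -⟩ := List.cons_prefix_cons.mp hp
          exact Or.inl ⟨e1.symm, e2.symm⟩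
        · exact Or.inr h
      · rintro (⟨e1, e2⟩ | h)
        · subst e1; subst e2
          exact Or.inl (List.cons_prefix_cons.mpr ⟨rfl, List.cons_prefix_cons.mpr ⟨rfl, List.nil_prefix⟩⟩)
        · exact Or.inr h
    have hlast : (prev :: c :: rest).getLast? = (c :: rest).getLast? := by
      simp [List.getLast?_cons_cons]
    by_cases h1 : c = '-'
    · subst h1
      by_cases h2 : prev = '-'
      · subst h2
        rw [show pvScan '-' ('-' :: rest) = false by simp [pvScan]]
        simp only [Bool.false_eq_true, false_iff]
        rintro ⟨ha, -, -⟩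
        exact ha (hinf.mpr (Or.inl ⟨rfl, rfl⟩))
      · rw [show pvScan prev ('-' :: rest) = pvScan '-' rest by simp [pvScan, h2]]
        rw [ih '-', hinf, hlast]
        constructor
        · rintro ⟨ha, hb, hc⟩
          refine ⟨?_, hb, ?_⟩
          · rintro (⟨e, -⟩ | hh)
            · exact h2 e
            · exact ha hh
          · intro x hx
            rcases List.mem_cons.mp hx with rfl | hx
            · exact Or.inl rfl
            · exact hc x hx
        · rintro ⟨ha, hb, hc⟩
          exact ⟨fun hh => ha (Or.inr hh), hb, fun x hx => hc x (List.mem_cons_of_mem _ hx)⟩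
    · by_cases h2 : pvAllowed c = true
      · rw [show pvScan prev (c :: rest) = pvScan c rest by simp [pvScan, h1, h2]]
        rw [ih c, hinf, hlast]
        constructor
        · rintro ⟨ha, hb, hc⟩
          refine ⟨?_, hb, ?_⟩
          · rintro (⟨-, e⟩ | hh)
            · exact h1 e
            · exact ha hh
          · intro x hx
            rcases List.mem_cons.mp hx with rfl | hx
            · exact Or.inr h2
            · exact hc x hx
        · rintro ⟨ha, hb, hc⟩
          exact ⟨fun hh => ha (Or.inr hh), hb, fun x hx => hc x (List.mem_cons_of_mem _ hx)⟩
      · rw [show pvScan prev (c :: rest) = false by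
            simp [pvScan, h1, show ¬ pvAllowed c = true from h2]]
        simp only [Bool.false_eq_true, false_iff]
        rintro ⟨-, -, hc⟩
        rcases hc c (by simp) with h | h
        · exact h1 h
        · exact h2 h

-- the heart: B's segment check succeeds exactly when all of A's checks pass (cs ≠ [])
lemma pvKey (cs : List Char) (h : cs ≠ []) :
    ((PySem.Chars.splitOn cs ['-']).all pvSegmentOk) = true ↔
      (PySem.Chars.startswith cs ['-'] || PySem.Chars.endswith cs ['-'] || PySem.Chars.isIn ['-', '-'] cs) = false ∧
      pvLoopA cs = none := by
  rw [pvSplitOn_eq, pvAll_splitHy cs [], List.all_nil, List.isEmpty_nil, if_pos rfl, Bool.true_and]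
  rw [pvScan_iff cs '-', pvLoopA_eq_none_iff]
  have hinf : (['-', '-'] <:+: ('-' :: cs)) ↔ cs.head? = some '-' ∨ ['-', '-'] <:+: cs := by
    rw [List.infix_cons_iff]
    constructor
    · rintro (hp | hh)
      · obtain ⟨-, hp⟩ := List.cons_prefix_cons.mp hp
        cases cs with
        | nil => simp at hp
        | cons x t =>
          obtain ⟨e, -⟩ := List.cons_prefix_cons.mp hp
          exact Or.inl (by simp [← e])
      · exact Or.inr hh
    · rintro (hh | hh)
      · cases cs with
        | nil => simp at hh
        | cons x t =>
          simp only [List.head?_cons, Option.some.injEq] at hh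
          subst hh
          exact Or.inl (List.cons_prefix_cons.mpr ⟨rfl, List.cons_prefix_cons.mpr ⟨rfl, List.nil_prefix⟩⟩)
      · exact Or.inr hh
  have hlast2 : ('-' :: cs).getLast? = cs.getLast? := by
    cases cs with
    | nil => exact absurd rfl h
    | cons x t => simp [List.getLast?_cons_cons]
  have hstart : PySem.Chars.startswith cs ['-'] = true ↔ cs.head? = some '-' := by
    rw [PySem.Chars.startswith_iff]
    cases cs with
    | nil => exact absurd rfl h
    | cons x t => simp [List.cons_prefix_cons, eq_comm]
  have hend : PySem.Chars.endswith cs ['-'] = true ↔ cs.getLast? = some '-' := by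
    rw [PySem.Chars.endswith_iff]
    constructor
    · rintro ⟨pre, rfl⟩
      simp [List.getLast?_append]
    · intro hl
      obtain ⟨l, rfl⟩ := List.getLast?_eq_some_iff.mp hl
      exact ⟨l, rfl⟩
  have hin : PySem.Chars.isIn ['-', '-'] cs = true ↔ ['-', '-'] <:+: cs :=
    PySem.Chars.isIn_iff_infix _ _
  rw [hinf, hlast2]
  constructor
  · rintro ⟨ha, hb, hc⟩
    refine ⟨?_, hc⟩
    simp only [Bool.or_eq_false_iff]
    refine ⟨⟨?_, ?_⟩, ?_⟩
    · rw [← Bool.not_eq_true, hstart]; exact fun hh => ha (Or.inl hh)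
    · rw [← Bool.not_eq_true, hend]; exact hb
    · rw [← Bool.not_eq_true, hin]; exact fun hh => ha (Or.inr hh)
  · rintro ⟨hs, hc⟩
    simp only [Bool.or_eq_false_iff] at hs
    refine ⟨?_, ?_, hc⟩
    · rintro (hh | hh)
      · rw [← hstart] at hh; simp [hh] at hs
      · rw [← hin] at hh; simp [hh] at hs
    · intro hh
      rw [← hend] at hh; simp [hh] at hs

-- ===== VERDICT (by name: the statement is the Claim_ definition above) =====
theorem validate_skill_name_py_spec : Claim_equal_validate_skill_name_py := by
  intro name directory_name _
  show _ = _
  by_cases he : name = ""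
  · simp [validate_skill_name_py, validate_skill_name_py_alt, he]
  · have hne : name.toList ≠ [] := by
      intro hnil
      exact he (String.toList_eq_nil_iff.mp hnil)
    by_cases hl : 64 < name.length
    · simp [validate_skill_name_py, validate_skill_name_py_alt, he, hl]
    · by_cases hS : ((PySem.Chars.startswith name.toList ['-'] = true ∨ PySem.Chars.endswith name.toList ['-'] = true) ∨ PySem.Chars.isIn ['-', '-'] name.toList = true)
      · have hok : ((PySem.Chars.splitOn name.toList ['-']).all pvSegmentOk) = false := by
          rw [← Bool.not_eq_true, pvKey _ hne]
          rintro ⟨hf, -⟩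
          rw [Bool.or_eq_false_iff, Bool.or_eq_false_iff] at hf
          rcases hS with (h | h) | h
          · rw [h] at hf; exact Bool.true_eq_false.mp hf.1.1
          · rw [h] at hf; exact Bool.true_eq_false.mp hf.1.2
          · rw [h] at hf; exact Bool.true_eq_false.mp hf.2
        simp [validate_skill_name_py, validate_skill_name_py_alt, he, hl, hS, hok]
      · have hS' : (PySem.Chars.startswith name.toList ['-'] || PySem.Chars.endswith name.toList ['-'] || PySem.Chars.isIn ['-', '-'] name.toList) = false := by
          rw [Bool.or_eq_false_iff, Bool.or_eq_false_iff]
          refine ⟨⟨?_, ?_⟩, ?_⟩ <;> rw [← Bool.not_eq_true] <;> intro hh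
          · exact hS (Or.inl (Or.inl hh))
          · exact hS (Or.inl (Or.inr hh))
          · exact hS (Or.inr hh)
        rcases pvLoopA_cases name.toList with hA | hA
        · have hok : ((PySem.Chars.splitOn name.toList ['-']).all pvSegmentOk) = true := (pvKey _ hne).mpr ⟨hS', hA⟩
          simp [validate_skill_name_py, validate_skill_name_py_alt, he, hl, hS, hA, hok]
        · have hok : ((PySem.Chars.splitOn name.toList ['-']).all pvSegmentOk) = false := by
            rw [← Bool.not_eq_true, pvKey _ hne]
            rintro ⟨-, hn⟩
            rw [hA] at hn
            exact Option.some_ne_none _ hn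
          simp [validate_skill_name_py, validate_skill_name_py_alt, he, hl, hS, hA, hok]
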